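-- pv_equiv track=rewrite | github.com/nakamaware/snampo | backend/app/infrastructure/mappers/polyline_mapper.py | _encode_value
-- ===== SOURCE A (Python) =====
-- def _encode_value(value: int) -> str:
--     """整数値をポリラインエンコード形式に変換
--
--     Args:
--         value: エンコードする整数値
--
--     Returns:
--         str: エンコードされた文字列
--     """
--     # 負の値の処理: 左シフトしてから反転
--     value = ~(value << 1) if value < 0 else value << 1
--
--     result: list[str] = []
--     while value >= 0x20:
--         result.append(chr((0x20 | (value & 0x1F)) + 63))
--         value >>= 5
--     result.append(chr(value + 63))
--
--     return "".join(result)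
-- ===== SOURCE B (Python) =====
-- def _encode_value(value: int) -> str:
--     # zig-zag transform (arithmetic form): n -> 2n for n >= 0, -2n-1 for n < 0
--     z = value * 2 if value >= 0 else -value * 2 - 1
--     # number of 5-bit groups, in closed form from the bit length (at least one group)
--     k = max(1, (z.bit_length() + 4) // 5)
--     # every group extracted independently by a shift; all but the last carry 0x20 (+95 vs +63)
--     return "".join(
--         chr((z >> 5 * i & 31) + (95 if i < k - 1 else 63)) for i in range(k)
--     )
-- ===== Notes on version B (the rewrite author's own statement) =====
-- stated objective: alternative
-- what changed: A emits characters from a data-dependent while loop that mutates the value and an accumulator list; B has no loop-carried state at all: it computes the chunk count in closed form from bit_length, then extracts each five-bit group independently with its own shift in one comprehension over the chunk indices, choosing the continuation or final offset by position.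
import Mathlib
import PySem

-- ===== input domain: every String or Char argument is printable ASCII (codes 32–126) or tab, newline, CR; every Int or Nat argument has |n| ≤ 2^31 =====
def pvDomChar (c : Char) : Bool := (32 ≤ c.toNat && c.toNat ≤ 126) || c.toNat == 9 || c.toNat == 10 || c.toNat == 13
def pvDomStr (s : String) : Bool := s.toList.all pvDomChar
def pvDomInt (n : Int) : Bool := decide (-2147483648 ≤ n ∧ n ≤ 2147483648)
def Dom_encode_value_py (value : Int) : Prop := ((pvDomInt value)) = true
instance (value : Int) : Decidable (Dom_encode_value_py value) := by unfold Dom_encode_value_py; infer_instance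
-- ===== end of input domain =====

-- B replaces A's data-dependent emit loop by a closed-form chunk count (from the bit length)
-- plus independent shift-based digit extraction in one map (objective: alternative, no loop-carried state).


-- ===== PORT A =====
-- A's while-loop: emit chr((0x20 | (value & 0x1F)) + 63), value >>= 5, until value < 0x20,
-- then emit chr(value + 63).  chr(k) is ported as Char.ofNat k.toNat; on the values this
-- program reaches (always in 63..126) that is exact.
def encodeLoopA (v : Int) : List Char :=
  if h : 0x20 ≤ v then
    Char.ofNat ((PySem.Int.bor 0x20 (PySem.Int.band v 0x1F)) + 63).toNat :: encodeLoopA (v >>> (5:Nat))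
  else
    [Char.ofNat ((v + 63).toNat)]
termination_by v.toNat
decreasing_by
  have h32 : v >>> (5:Nat) = v / 2 ^ 5 := Int.shiftRight_eq_div_pow v 5
  omega

def encode_value_py (value : Int) : String :=
  let value := if value < 0 then Int.not (value <<< (1:Nat)) else value <<< (1:Nat)
  String.ofList (encodeLoopA value)

-- ===== PORT B =====
-- B: zig-zag arithmetically, then k = max(1, (z.bit_length()+4)//5) 5-bit groups, each group
-- extracted independently as z >> 5*i & 31, offset 95 (continuation) or 63 (last).
-- z.bit_length() on the nonnegative z this reaches is exactly Nat.size; chr as in port A.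
def encode_value_py_alt (value : Int) : String :=
  let z : Int := if 0 ≤ value then value * 2 else -value * 2 - 1
  let k : Nat := max 1 ((z.toNat.size + 4) / 5)
  String.ofList ((List.range k).map (fun (i : Nat) =>
    Char.ofNat ((PySem.Int.band (z >>> ((5 * i : Nat))) 31).toNat + (if i < k - 1 then 95 else 63))))

-- ===== PRECONDITION & SPEC =====
def Spec_encode_value_py (value : Int) (out : String) : Prop := out = encode_value_py_alt value
instance (value : Int) (out : String) : Decidable (Spec_encode_value_py value out) := by unfold Spec_encode_value_py; infer_instance

-- ===== CLAIM (what is proved, stated in full; the proofs are below) =====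
def Claim_equal_encode_value_py : Prop := ∀ (value : Int), Dom_encode_value_py value → Spec_encode_value_py value (encode_value_py value)

-- ===== LEMMAS AND PROOFS =====

-- chunk count of B, at the Nat level
def kkB (n : Nat) : Nat := max 1 ((n.size + 4) / 5)

lemma or32_eq_add (m : Nat) (h : m < 32) : (32 ||| m) = 32 + m := by
  interval_cases m <;> rfl

lemma size_div32 (n : Nat) (h : 32 ≤ n) : (n / 32).size = n.size - 5 := by
  have hb : 6 ≤ n.size := Nat.lt_size.mpr (by norm_num; omega)
  have key : ∀ s : Nat, ((n / 32).size ≤ s ↔ n.size ≤ s + 5) := by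
    intro s
    rw [Nat.size_le, Nat.size_le, Nat.div_lt_iff_lt_mul (by norm_num : 0 < 32)]
    have : (2:Nat) ^ (s + 5) = 2 ^ s * 32 := by rw [pow_add]; norm_num
    rw [this]
  have h1 : n.size ≤ (n / 32).size + 5 := (key _).mp le_rfl
  have h2 : (n / 32).size ≤ n.size - 5 := (key _).mpr (by omega)
  omega

lemma kkB_step (n : Nat) (h : 32 ≤ n) : kkB n = kkB (n / 32) + 1 := by
  have hb : 6 ≤ n.size := Nat.lt_size.mpr (by norm_num; omega)
  have := size_div32 n h
  unfold kkB
  omega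

lemma kkB_small (n : Nat) (h : n < 32) : kkB n = 1 := by
  have : n.size ≤ 5 := Nat.size_le.mpr (by norm_num; omega)
  unfold kkB; omega

lemma digit_toNat (n : Nat) (m : Nat) :
    (PySem.Int.band ((n : Int) >>> m) 31).toNat = n / 2 ^ m % 32 := by
  have h1 : ((n : Int) >>> m) = ((n >>> m : Nat) : Int) := by simp
  rw [h1, show (31:Int) = ((31:Nat):Int) by norm_num, PySem.Int.band_natCast, Int.toNat_natCast,
      Nat.and_two_pow_sub_one_eq_mod _ 5, Nat.shiftRight_eq_div_pow]

-- the heart of the equivalence: A's interleaved loop on a nonnegative value produces exactly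
-- B's position-indexed digit map
lemma loopA_eq_map (n : Nat) :
    encodeLoopA (n : Int) =
      (List.range (kkB n)).map (fun i =>
        Char.ofNat (n / 2 ^ (5 * i) % 32 + (if i < kkB n - 1 then 95 else 63))) := by
  induction n using Nat.strong_induction_on with
  | _ n ih =>
    by_cases h : 32 ≤ n
    · -- loop body runs once, then recurse on n / 32
      have hband : PySem.Int.band (n : Int) 0x1F = ((n % 32 : Nat) : Int) := by
        have := PySem.Int.band_natCast n 31
        rw [show ((0x1F:Int)) = ((31:Nat):Int) by norm_num, this,
            Nat.and_two_pow_sub_one_eq_mod n 5]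
      have hbor : PySem.Int.bor 0x20 ((n % 32 : Nat) : Int) = ((32 + n % 32 : Nat) : Int) := by
        have := PySem.Int.bor_natCast 32 (n % 32)
        rw [show ((0x20:Int)) = ((32:Nat):Int) by norm_num, this,
            or32_eq_add (n % 32) (Nat.mod_lt _ (by norm_num))]
      have hshift : ((n : Int) >>> (5:Nat)) = ((n / 32 : Nat) : Int) := by
        have hc : ((n : Int) >>> (5:Nat)) = ((n >>> 5 : Nat) : Int) := by simp
        rw [hc, Nat.shiftRight_eq_div_pow]
      have hA : encodeLoopA (n : Int) =
          Char.ofNat ((((32 + n % 32 : Nat) : Int) + 63).toNat) :: encodeLoopA ((n / 32 : Nat) : Int) := by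
        rw [encodeLoopA, dif_pos (by exact_mod_cast h : (0x20:Int) ≤ (n:Int)), hband, hbor, hshift]
      have hk := kkB_step n h
      have hk1 : 1 ≤ kkB (n / 32) := le_max_left _ _
      rw [hA, ih (n / 32) (by omega), hk, List.range_succ_eq_map, List.map_cons, List.map_map]
      congr 1
      · -- head characters agree
        have : 0 < kkB (n / 32) + 1 - 1 := by omega
        rw [if_pos this]
        have hmod : n / 2 ^ (5 * 0) % 32 = n % 32 := by norm_num
        rw [hmod]
        congr 1
        push_cast
        omega
      · -- tails agree: reindex i ↦ i + 1
        apply List.map_congr_left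
        intro i _
        simp only [Function.comp]
        have hdiv : n / 32 / 2 ^ (5 * i) = n / 2 ^ (5 * (i + 1)) := by
          rw [Nat.div_div_eq_div_mul, show 5 * (i + 1) = 5 + 5 * i by ring, pow_add]
          norm_num [mul_comm]
        rw [hdiv, Nat.succ_eq_add_one]
        by_cases hc : i < kkB (n / 32) - 1
        · rw [if_pos hc, if_pos (by omega)]
        · rw [if_neg hc, if_neg (by omega)]
    · -- loop body never runs
      have hA : encodeLoopA (n : Int) = [Char.ofNat (((n : Int) + 63).toNat)] := by
        rw [encodeLoopA, dif_neg (by exact_mod_cast h : ¬ (0x20:Int) ≤ (n:Int))]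
      rw [hA, kkB_small n (by omega), List.range_one, List.map_singleton]
      have : n / 2 ^ (5 * 0) % 32 = n := by
        norm_num [Nat.mod_eq_of_lt (by omega : n < 32)]
      rw [this, if_neg (by omega)]
      congr 1

lemma zigzag_eq (value : Int) :
    (if value < 0 then Int.not (value <<< (1:Nat)) else value <<< (1:Nat)) =
      (if 0 ≤ value then value * 2 else -value * 2 - 1) := by
  have hs : value <<< (1:Nat) = 2 * value := by rw [Int.shiftLeft_eq]; ring
  have hn : ∀ w : Int, Int.not w = -w - 1 := by
    intro w
    cases w with
    | ofNat m => simp [Int.not]; omega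
    | negSucc m => simp [Int.not]
  rcases lt_or_ge value 0 with h | h
  · rw [if_pos h, if_neg (by omega), hs, hn]; ring
  · rw [if_neg (by omega), if_pos h, hs]; ring

-- ===== VERDICT (by name: the statement is the Claim_ definition above) =====
theorem encode_value_py_spec : Claim_equal_encode_value_py := by
  unfold Claim_equal_encode_value_py
  intro value _
  unfold Spec_encode_value_py encode_value_py encode_value_py_alt
  simp only [zigzag_eq]
  set z : Int := if 0 ≤ value then value * 2 else -value * 2 - 1 with hz
  have hz0 : 0 ≤ z := by rw [hz]; split <;> omega
  obtain ⟨n, hn⟩ : ∃ n : Nat, z = (n : Int) := ⟨z.toNat, (Int.toNat_of_nonneg hz0).symm⟩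
  rw [hn, loopA_eq_map n]
  simp only [kkB, Int.toNat_natCast, digit_toNat]
  rfl
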